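-- pv_equiv track=rewrite | github.com/shinkou/unicnv | dist/unicnv/utils.py | ux
-- ===== SOURCE A (Python) =====
-- import math, re
--
-- def ux(i):
-- 	'''Convert hex to valid UTF-16 character expression \\uXXXX'''
-- 	i = int(i, 16)
-- 	if 0xffff < i:
-- 		i = int.from_bytes(chr(i).encode('utf-16be'), 'big')
-- 	nob = 1 if 2 > i else math.ceil(math.log(i, 0xffff))
-- 	s = ''
-- 	for cnt in range(0, nob):
-- 		s += '\\u%04X' % ((i >> (16 * (nob - cnt - 1))) & 0xffff,)
-- 	return s
-- ===== SOURCE B (Python) =====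
-- def ux(i):
--     '''Convert hex to valid UTF-16 character expression \\uXXXX'''
--     n = int(i, 16)
--     if n <= 0xffff:
--         return '\\u%04X' % (n & 0xffff)
--     b = chr(n).encode('utf-16be')
--     return ''.join('\\u%04X' % int.from_bytes(b[j:j+2], 'big')
--                    for j in range(0, len(b), 2))
-- ===== Notes on version B (the rewrite author's own statement) =====
-- stated objective: simpler
-- what changed: B branches on n <= 0xffff and formats the BMP value directly, and for supplementary codepoints joins '\u%04X' over the utf-16be byte pairs, eliminating A's math.log/math.ceil word-count computation and its shift/mask loop.
-- outside the precondition, e.g. on ux('110000'): A raises ValueError, B raises ValueError; on ux('xyz'): A raises ValueError, B raises ValueError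
import Mathlib
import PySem

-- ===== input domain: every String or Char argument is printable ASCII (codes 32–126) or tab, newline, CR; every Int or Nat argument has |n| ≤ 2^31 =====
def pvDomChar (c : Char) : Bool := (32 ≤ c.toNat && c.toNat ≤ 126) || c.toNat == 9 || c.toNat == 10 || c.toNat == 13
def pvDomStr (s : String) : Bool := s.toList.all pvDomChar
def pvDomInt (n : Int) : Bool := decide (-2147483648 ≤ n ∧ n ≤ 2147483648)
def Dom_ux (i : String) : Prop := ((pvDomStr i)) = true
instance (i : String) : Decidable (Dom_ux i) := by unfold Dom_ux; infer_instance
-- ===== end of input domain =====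

-- B replaces A's math.log/ceil word count and shift/mask loop by a direct BMP branch plus a
-- join over the utf-16be byte pairs (objective: simpler).

-- shared helper of both ports: '\u%04X' % x for 0 ≤ x ≤ 0xffff (both Pythons use this format;
-- exact on that range: exactly 4 uppercase hex digits, zero-padded)
def pvHexDigitU (n : Nat) : Char := if n < 10 then Char.ofNat (48 + n) else Char.ofNat (55 + n)
def pvFmtU (x : Int) : String :=
  let n := x.toNat
  String.ofList ['\\', 'u', pvHexDigitU (n / 4096 % 16), pvHexDigitU (n / 256 % 16),
             pvHexDigitU (n / 16 % 16), pvHexDigitU (n % 16)]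

-- ===== PORT A =====
-- math.ceil (math.log i 0xffff), ported as its exact integer value on the values A reaches here:
-- 2 ≤ i ≤ 0xffff gives 1, and the only larger reachable values are surrogate-pair words
-- (0xD800DC00 ≤ i ≤ 0xDBFFDFFF), where the float computation gives exactly 2.
def pvCeilLogA (i : Int) : Int := if i ≤ 0xffff then 1 else 2

-- the 'for cnt in range(0, nob): s += ...' loop of A
def pvLoopA (i : Int) : String :=
  let nob : Int := if i < 2 then 1 else pvCeilLogA i
  (PySem.List.pyRange 0 nob 1).foldl
    (fun s cnt => s ++ pvFmtU (PySem.Int.band (i >>> ((16 * (nob - cnt - 1)).toNat)) 0xffff)) ""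

def ux (i : String) : String :=
  match PySem.Int.ofStrBase? i 16 with
  | none => ""           -- int(i, 16) raises ValueError; excluded by Pre_ux
  | some n =>
    if 0xffff < n then
      if 0x10FFFF < n then ""   -- chr(n) raises ValueError; excluded by Pre_ux
      else
        -- int.from_bytes(chr(n).encode('utf-16be'), 'big') = hi*0x10000 + lo, the surrogate pair (exact)
        let v := n - 0x10000
        pvLoopA ((0xD800 + v / 0x400) * 0x10000 + (0xDC00 + v % 0x400))
    else pvLoopA n

-- ===== PORT B =====
def ux_alt (i : String) : String :=
  match PySem.Int.ofStrBase? i 16 with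
  | none => ""           -- int(i, 16) raises ValueError; excluded by Pre_ux
  | some n =>
    if n ≤ 0xffff then pvFmtU (PySem.Int.band n 0xffff)
    else if 0x10FFFF < n then ""   -- chr(n) raises ValueError; excluded by Pre_ux
    else
      -- chr(n).encode('utf-16be') = the 4 bytes of the surrogate pair (exact);
      -- int.from_bytes(b[j:j+2], 'big') = b[j]*256 + b[j+1] (exact for the 2-byte slices taken)
      let v := n - 0x10000
      let hi := 0xD800 + v / 0x400
      let lo := 0xDC00 + v % 0x400
      let b : List Int := [hi / 256, hi % 256, lo / 256, lo % 256]
      PySem.Str.join "" ((PySem.List.pyRange 0 4 2).map (fun j =>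
        pvFmtU (PySem.List.pyGetD b j 0 * 256 + PySem.List.pyGetD b (j + 1) 0)))

-- ===== PRECONDITION & SPEC =====
-- Pre_ux excludes exactly the inputs where A raises: strings int(i,16) rejects (ValueError)
-- and values above 0x10FFFF, where chr(n) raises ValueError.
def Pre_ux (i : String) : Prop := (PySem.Int.ofStrBase? i 16).getD 0x110000 ≤ 0x10FFFF
instance (i : String) : Decidable (Pre_ux i) := by unfold Pre_ux; infer_instance
def pvWitness_ux : String := "1f600"

def Spec_ux (i : String) (out : String) : Prop := out = ux_alt i
instance (i : String) (out : String) : Decidable (Spec_ux i out) := by unfold Spec_ux; infer_instance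

-- ===== CLAIM (what is proved, stated in full; the proofs are below) =====
def Claim_equal_ux : Prop := ∀ (i : String), Dom_ux i → Pre_ux i → Spec_ux i (ux i)

-- ===== LEMMAS AND PROOFS =====

theorem pv_join_two (a b : String) : PySem.Str.join "" [a, b] = a ++ b := by
  simp [PySem.Str.join, PySem.Chars.join_cons_cons, PySem.Chars.join_singleton]

theorem pv_band_mod (x : Int) (h0 : 0 ≤ x) : PySem.Int.band x 0xffff = x % 65536 := by
  rw [PySem.Int.band_of_nonneg h0 (by norm_num)]
  have h1 : x.toNat &&& (65535 : Nat) = x.toNat % 65536 := by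
    have h2 := Nat.and_two_pow_sub_one_eq_mod x.toNat 16
    norm_num at h2
    exact h2
  have h3 : (0xffff : Int).toNat = (65535 : Nat) := rfl
  rw [h3, h1]
  omega

theorem pv_shift16 (x : Int) (h0 : 0 ≤ x) : x >>> (16 : Nat) = x / 65536 := by
  obtain ⟨m, hm⟩ : ∃ m : Nat, x = (m : Int) := ⟨x.toNat, (Int.toNat_of_nonneg h0).symm⟩
  subst hm
  rw [show ((m : Int) >>> (16 : Nat)) = ((m >>> 16 : Nat) : Int) from by exact_mod_cast rfl]
  have h4 : m >>> 16 = m / 65536 := by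
    have := Nat.shiftRight_eq_div_pow m 16
    norm_num at this
    exact this
  rw [h4]
  omega

theorem pvLoopA_bmp (n : Int) (hn : n ≤ 0xffff) :
    pvLoopA n = pvFmtU (PySem.Int.band n 0xffff) := by
  unfold pvLoopA pvCeilLogA
  have hnob : (if n < 2 then (1:Int) else if n ≤ 0xffff then 1 else 2) = 1 := by
    split_ifs <;> omega
  rw [hnob]
  simp only [show PySem.List.pyRange 0 1 1 = [0] from by decide, List.foldl_cons, List.foldl_nil]
  norm_num

theorem pvLoopA_pair (h l : Int) (hh0 : 0xD800 ≤ h) (hh1 : h ≤ 0xDBFF)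
    (hl0 : 0xDC00 ≤ l) (hl1 : l ≤ 0xDFFF) :
    pvLoopA (h * 65536 + l) = pvFmtU h ++ pvFmtU l := by
  unfold pvLoopA pvCeilLogA
  have hnob : (if h * 65536 + l < 2 then (1:Int) else if h * 65536 + l ≤ 0xffff then 1 else 2) = 2 := by
    split_ifs <;> omega
  rw [hnob]
  simp only [show PySem.List.pyRange 0 2 1 = [0, 1] from by decide, List.foldl_cons, List.foldl_nil]
  have e1 : ((16 * (2 - 0 - 1) : Int)).toNat = (16 : Nat) := rfl
  have e2 : ((16 * (2 - 1 - 1) : Int)).toNat = (0 : Nat) := rfl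
  rw [e1, e2]
  have hx0 : (0:Int) ≤ h * 65536 + l := by omega
  have ez : (h * 65536 + l) >>> (0 : Nat) = h * 65536 + l := by simp
  rw [pv_shift16 _ hx0, ez]
  rw [pv_band_mod _ (by omega), pv_band_mod _ hx0]
  have ed : (h * 65536 + l) / 65536 % 65536 = h := by omega
  have em : (h * 65536 + l) % 65536 = l := by omega
  rw [ed, em]
  simp

-- ===== VERDICT (by name: the statement is the Claim_ definition above) =====
theorem ux_spec : Claim_equal_ux := by
  intro i _ hpre
  unfold Spec_ux ux ux_alt
  unfold Pre_ux at hpre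
  cases hoc : PySem.Int.ofStrBase? i 16 with
  | none => simp [hoc] at hpre
  | some n =>
    rw [hoc] at hpre; simp only [Option.getD_some] at hpre
    by_cases hb : 0xffff < n
    · have hle : ¬ n ≤ 0xffff := by omega
      have hch : ¬ 0x10FFFF < n := by omega
      simp only [if_pos hb, if_neg hle, if_neg hch]
      have hv0 : (0:Int) ≤ n - 0x10000 := by omega
      have hv1 : n - 0x10000 < 0x100000 := by omega
      set v := n - 0x10000 with hv
      have hd0 : (0:Int) ≤ v / 0x400 := by positivity
      have hd1 : v / 0x400 ≤ 0x3FF := by omega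
      have hm0 : (0:Int) ≤ v % 0x400 := Int.emod_nonneg v (by norm_num)
      have hm1 : v % 0x400 < 0x400 := Int.emod_lt_of_pos v (by norm_num)
      rw [pvLoopA_pair _ _ (by omega) (by omega) (by omega) (by omega)]
      rw [show PySem.List.pyRange 0 4 2 = [0, 2] from by decide]
      simp only [List.map_cons, List.map_nil]
      rw [pv_join_two]
      norm_num [PySem.List.pyGetD, PySem.List.pyGet?, PySem.List.pyIdx?,
        show ((0:Int).toNat) = 0 from rfl, show ((1:Int).toNat) = 1 from rfl,
        show ((2:Int).toNat) = 2 from rfl, show ((3:Int).toNat) = 3 from rfl]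
      have eh : (0xD800 + v / 0x400) / 256 * 256 + (0xD800 + v / 0x400) % 256 = 0xD800 + v / 0x400 := by omega
      have el : (0xDC00 + v % 0x400) / 256 * 256 + (0xDC00 + v % 0x400) % 256 = 0xDC00 + v % 0x400 := by omega
      rw [eh, el]
    · have hle : n ≤ 0xffff := by omega
      simp only [if_neg hb, if_pos hle]
      exact pvLoopA_bmp n hle
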